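-- pv_equiv track=rewrite | github.com/subbak2/TIL | 1911/1103/auctionCrawler.py | headerParser
-- ===== SOURCE A (Python) =====
-- def headerParser(str):
--
--     outString = ""
--     tmpString = "'"
--
--     for i in str:
--         if i==':':
--             outString = outString + tmpString + "' : "
--             tmpString = "'"
--
--         elif i=='\n':
--             outString = outString + tmpString + "', "
--             tmpString="'"
--
--         elif i!=' ':
--             tmpString=tmpString+i
--     return outString
-- ===== SOURCE B (Python) =====
-- def headerParser(str):
--     # split-based reformulation: strip spaces once, split into lines, split each
--     # line on ':'; quote every segment; content after the last delimiter is dropped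
--     lines = str.replace(' ', '').split('\n')
--     out = []
--     for line in lines[:-1]:
--         *init, last = line.split(':')
--         out += ["'%s' : " % s for s in init]
--         out.append("'%s', " % last)
--     *init, _ = lines[-1].split(':')
--     out += ["'%s' : " % s for s in init]
--     return ''.join(out)
-- ===== Notes on version B (the rewrite author's own statement) =====
-- stated objective: faster
-- what changed: replaces the character-by-character running-buffer state machine (which rebuilds outString by repeated string concatenation) with a strip-spaces / split-on-newline / split-each-line-on-colon / format-and-join decomposition that joins the pieces once; the unterminated trailing segment is dropped by discarding the last colon-piece of the last line
import Mathlib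
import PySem

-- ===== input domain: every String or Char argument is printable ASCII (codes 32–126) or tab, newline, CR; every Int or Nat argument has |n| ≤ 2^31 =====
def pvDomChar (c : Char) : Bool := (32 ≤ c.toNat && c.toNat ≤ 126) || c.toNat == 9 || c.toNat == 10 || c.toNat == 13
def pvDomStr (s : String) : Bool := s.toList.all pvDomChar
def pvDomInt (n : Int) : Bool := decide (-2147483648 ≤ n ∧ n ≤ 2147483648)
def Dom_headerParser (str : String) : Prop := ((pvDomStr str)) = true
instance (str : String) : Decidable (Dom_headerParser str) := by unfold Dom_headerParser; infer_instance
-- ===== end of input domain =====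

-- B replaces A's character-by-character running-buffer scan (quadratic repeated string
-- concatenation) by a strip-spaces / split-on-newline / split-on-colon / format-and-join
-- decomposition that joins the output pieces once (measured faster).

-- ===== PORT A =====
-- strings are carried as List Char (Lean's String.append is kernel-opaque); the
-- fold state is (outString, tmpString), exactly A's two accumulators
def hpStepA (s : List Char × List Char) (c : Char) : List Char × List Char :=
  if c = ':' then (s.1 ++ s.2 ++ ['\'', ' ', ':', ' '], ['\''])
  else if c = '\n' then (s.1 ++ s.2 ++ ['\'', ',', ' '], ['\''])
  else if c ≠ ' ' then (s.1, s.2 ++ [c]) else s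

def headerParser (str : String) : String :=
  String.mk (str.toList.foldl hpStepA ([], ['\''])).1

-- ===== PORT B =====
def hpEmitC (s : List Char) : List Char := '\'' :: s ++ ['\'', ' ', ':', ' ']   -- "'%s' : " % s
def hpEmitNL (s : List Char) : List Char := '\'' :: s ++ ['\'', ',', ' ']       -- "'%s', " % s

def headerParser_alt (str : String) : String :=
  let lines := PySem.Chars.splitOn (PySem.Str.replace str " " "").toList ['\n']
  let out := lines.dropLast.foldl (fun out line =>
      let segs := PySem.Chars.splitOn line [':']
      out ++ segs.dropLast.map hpEmitC ++ [hpEmitNL (segs.getLastD [])]) []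
  let out2 := out ++ (PySem.Chars.splitOn (lines.getLastD []) [':']).dropLast.map hpEmitC
  String.mk (PySem.Chars.join [] out2)

-- ===== PRECONDITION & SPEC =====
def Spec_headerParser (str : String) (out : String) : Prop := out = headerParser_alt str
instance (str : String) (out : String) : Decidable (Spec_headerParser str out) := by unfold Spec_headerParser; infer_instance

-- ===== CLAIM (what is proved, stated in full; the proofs are below) =====
def Claim_equal_headerParser : Prop := ∀ (str : String), Dom_headerParser str → Spec_headerParser str (headerParser str)

-- ===== LEMMAS AND PROOFS =====

-- reference single-char splitter (Python str.split(d) on a one-char separator)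
def splitCh (d : Char) (q : List Char) : List Char → List (List Char)
  | [] => [q]
  | c :: cs => if c = d then q :: splitCh d [] cs else splitCh d (q ++ [c]) cs

-- A's scan, outString factored away: tmpString = '\'' :: p
def hpG (p : List Char) : List Char → List Char
  | [] => []
  | c :: cs =>
    if c = ':' then hpEmitC p ++ hpG [] cs
    else if c = '\n' then hpEmitNL p ++ hpG [] cs
    else if c ≠ ' ' then hpG (p ++ [c]) cs else hpG p cs

-- B's rendering, over splitCh
def rendFull (segs : List (List Char)) : List (List Char) :=
  segs.dropLast.map hpEmitC ++ [hpEmitNL (segs.getLastD [])]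

def rendAll (lines : List (List Char)) : List (List Char) :=
  lines.dropLast.flatMap (fun l => rendFull (splitCh ':' [] l))
    ++ (splitCh ':' [] (lines.getLastD [])).dropLast.map hpEmitC

theorem foldA_eq_hpG (cs : List Char) : ∀ (o p : List Char),
    (cs.foldl hpStepA (o, '\'' :: p)).1 = o ++ hpG p cs := by
  induction cs with
  | nil => intro o p; simp [hpG]
  | cons c cs ih =>
    intro o p
    by_cases hc : c = ':'
    · simp [hpStepA, hpG, hc, ih, hpEmitC]
    · by_cases hn : c = '\n'
      · simp [hpStepA, hpG, hn, ih, hpEmitNL]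
      · by_cases hs : c = ' '
        · simp [hpStepA, hpG, hs, ih]
        · simp [hpStepA, hpG, hc, hn, hs, ih]

theorem hpG_filter (cs : List Char) : ∀ (p : List Char),
    hpG p cs = hpG p (cs.filter (fun c => c != ' ')) := by
  induction cs with
  | nil => intro p; simp
  | cons c cs ih =>
    intro p
    by_cases hs : c = ' '
    · simp [hpG, hs, ih]
    · by_cases hc : c = ':'
      · simp [hpG, hc, ih]
      · by_cases hn : c = '\n'
        · simp [hpG, hn, ih]
        · simp [hpG, hs, hc, hn, ih]

theorem replace_go_filter (fuel : Nat) : ∀ (l acc : List Char), l.length ≤ fuel →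
    PySem.Chars.replace.go [' '] [] fuel l acc = acc.reverse ++ l.filter (fun c => c != ' ') := by
  induction fuel with
  | zero =>
    intro l acc h
    have : l = [] := List.eq_nil_of_length_eq_zero (Nat.le_zero.mp h)
    subst this; simp [PySem.Chars.replace.go]
  | succ fuel ih =>
    intro l acc h
    cases l with
    | nil => simp [PySem.Chars.replace.go]
    | cons c t =>
      by_cases hs : c = ' '
      · simp [PySem.Chars.replace.go, hs, List.isPrefixOf,
          ih t acc (by simpa using Nat.le_of_succ_le_succ h)]
      · simp [PySem.Chars.replace.go, List.isPrefixOf, hs, Ne.symm hs,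
          ih t (c :: acc) (by simpa using Nat.le_of_succ_le_succ h)]

theorem replace_space (cs : List Char) :
    PySem.Chars.replace cs [' '] [] = cs.filter (fun c => c != ' ') := by
  simpa [PySem.Chars.replace] using replace_go_filter cs.length cs [] (le_refl _)

theorem splitOn_go_splitCh (d : Char) (fuel : Nat) : ∀ (l cur : List Char) (acc : List (List Char)),
    l.length ≤ fuel →
    PySem.Chars.splitOn.go [d] fuel l cur acc = acc.reverse ++ splitCh d cur.reverse l := by
  induction fuel with
  | zero =>
    intro l cur acc h
    have : l = [] := List.eq_nil_of_length_eq_zero (Nat.le_zero.mp h)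
    subst this; simp [PySem.Chars.splitOn.go, splitCh]
  | succ fuel ih =>
    intro l cur acc h
    cases l with
    | nil => simp [PySem.Chars.splitOn.go, splitCh]
    | cons c t =>
      by_cases hd : c = d
      · simp [PySem.Chars.splitOn.go, List.isPrefixOf, hd, splitCh,
          ih t [] (cur.reverse :: acc) (by simpa using Nat.le_of_succ_le_succ h)]
      · simp [PySem.Chars.splitOn.go, List.isPrefixOf, hd, Ne.symm hd, splitCh,
          ih t (c :: cur) acc (by simpa using Nat.le_of_succ_le_succ h)]

theorem splitOn_eq_splitCh (cs : List Char) (d : Char) :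
    PySem.Chars.splitOn cs [d] = splitCh d [] cs := by
  simpa [PySem.Chars.splitOn] using
    splitOn_go_splitCh d (cs.length + 1) cs [] [] (Nat.le_succ _)

theorem splitCh_ne_nil (d : Char) (cs : List Char) : ∀ (q : List Char), splitCh d q cs ≠ [] := by
  induction cs with
  | nil => intro q; simp [splitCh]
  | cons c cs ih =>
    intro q
    by_cases hd : c = d
    · simp [splitCh, hd]
    · simp [splitCh, hd, ih]

theorem splitCh_no (d : Char) (cs : List Char) : ∀ (q : List Char), d ∉ cs →
    splitCh d q cs = [q ++ cs] := by
  induction cs with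
  | nil => intro q _; simp [splitCh]
  | cons c cs ih =>
    intro q h
    have hc : c ≠ d := fun he => h (by simp [he])
    simp [splitCh, hc, ih (q ++ [c]) (fun hm => h (by simp [hm]))]

theorem splitCh_append (d : Char) (p : List Char) : ∀ (q cs : List Char), d ∉ p →
    splitCh d q (p ++ cs) = splitCh d (q ++ p) cs := by
  induction p with
  | nil => intro q cs _; simp
  | cons a p ih =>
    intro q cs h
    have ha : a ≠ d := fun he => h (by simp [he])
    have h' : d ∉ p := fun hm => h (by simp [hm])
    simp only [List.cons_append, splitCh, if_neg ha]
    rw [ih (q ++ [a]) cs h']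
    simp

theorem splitCh_prepend (d : Char) (cs : List Char) : ∀ (q p : List Char),
    splitCh d (p ++ q) cs = (p ++ (splitCh d q cs).headI) :: (splitCh d q cs).tail := by
  induction cs with
  | nil => intro q p; simp [splitCh]
  | cons c cs ih =>
    intro q p
    by_cases hd : c = d
    · simp [splitCh, hd]
    · simp only [splitCh, if_neg hd]
      rw [List.append_assoc p q [c], ih (q ++ [c]) p]

theorem getLastD_cons_of_ne_nil {α : Type} (x : α) (L : List α) (d d' : α) (h : L ≠ []) :
    (x :: L).getLastD d = L.getLastD d' := by
  cases L with
  | nil => exact absurd rfl h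
  | cons y ys => simp [List.getLastD]

theorem rendFull_cons (p : List Char) (L : List (List Char)) (h : L ≠ []) :
    rendFull (p :: L) = hpEmitC p :: rendFull L := by
  unfold rendFull
  rw [List.dropLast_cons_of_ne_nil h, getLastD_cons_of_ne_nil p L [] [] h]
  simp

theorem rendAll_cons (x : List Char) (T : List (List Char)) (h : T ≠ []) :
    rendAll (x :: T) = rendFull (splitCh ':' [] x) ++ rendAll T := by
  unfold rendAll
  rw [List.dropLast_cons_of_ne_nil h, getLastD_cons_of_ne_nil x T [] [] h]
  simp

theorem rendAll_single (x : List Char) :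
    rendAll [x] = (splitCh ':' [] x).dropLast.map hpEmitC := by
  simp [rendAll]

theorem rendAll_colon (p H : List Char) (T : List (List Char)) (hc : (':' : Char) ∉ p) :
    rendAll ((p ++ ':' :: H) :: T) = hpEmitC p :: rendAll (H :: T) := by
  have hsplit : splitCh ':' [] (p ++ ':' :: H) = p :: splitCh ':' [] H := by
    rw [splitCh_append ':' p [] (':' :: H) hc]
    simp [splitCh]
  cases T with
  | nil =>
    rw [rendAll_single, rendAll_single, hsplit,
      List.dropLast_cons_of_ne_nil (splitCh_ne_nil ':' H []), List.map_cons]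
  | cons t ts =>
    rw [rendAll_cons (p ++ ':' :: H) (t :: ts) (by simp),
      rendAll_cons H (t :: ts) (by simp), hsplit,
      rendFull_cons p _ (splitCh_ne_nil ':' H [])]
    simp

theorem hpG_eq_rendAll (cs : List Char) : ∀ (p : List Char),
    (':' : Char) ∉ p → ('\n' : Char) ∉ p → (∀ c ∈ cs, c ≠ ' ') →
    hpG p cs = (rendAll (splitCh '\n' p cs)).flatten := by
  induction cs with
  | nil =>
    intro p hc _ _
    simp [hpG, splitCh, rendAll, splitCh_no ':' p [] hc]
  | cons c cs ih =>
    intro p hc hn hs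
    have hcs : ∀ x ∈ cs, x ≠ ' ' := fun x hx => hs x (by simp [hx])
    have hcsp : c ≠ ' ' := hs c (by simp)
    obtain ⟨H, T, hS⟩ : ∃ H T, splitCh '\n' [] cs = H :: T := by
      cases h : splitCh '\n' [] cs with
      | nil => exact absurd h (splitCh_ne_nil '\n' cs [])
      | cons H T => exact ⟨H, T, rfl⟩
    by_cases h1 : c = ':'
    · subst h1
      have hp : splitCh '\n' p (':' :: cs) = (p ++ ':' :: H) :: T := by
        simp only [splitCh, if_neg (by decide : (':' : Char) ≠ '\n')]
        have := splitCh_prepend '\n' cs [] (p ++ [':'])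
        simp only [List.append_nil] at this
        rw [this, hS]; simp
      rw [hpG, if_pos rfl, hp, rendAll_colon p H T hc, ← hS,
        ih [] (by simp) (by simp) hcs]
      simp
    · by_cases h2 : c = '\n'
      · subst h2
        have hp : splitCh '\n' p ('\n' :: cs) = p :: H :: T := by
          simp [splitCh, hS]
        rw [hpG, if_neg (by decide), if_pos rfl, hp,
          rendAll_cons p (H :: T) (by simp),
          splitCh_no ':' p [] hc, ← hS, ih [] (by simp) (by simp) hcs]
        simp [rendFull, hpEmitNL]
      · have hp : splitCh '\n' p (c :: cs) = splitCh '\n' (p ++ [c]) cs := by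
          simp [splitCh, h2]
        rw [hpG, if_neg h1, if_neg h2, if_pos hcsp, hp,
          ih (p ++ [c]) (by simp [hc, Ne.symm h1]) (by simp [hn, Ne.symm h2]) hcs]

theorem join_nil_eq_flatten (parts : List (List Char)) :
    PySem.Chars.join [] parts = parts.flatten := by
  induction parts with
  | nil => simp [PySem.Chars.join, List.intercalate]
  | cons p ps ih =>
    cases ps with
    | nil => simp [PySem.Chars.join, List.intercalate]
    | cons q qs =>
      simp only [PySem.Chars.join, List.intercalate, List.intersperse] at ih ⊢
      simp_all

theorem foldB_flatMap (f1 : List Char → List (List Char)) (f2 : List Char → List Char)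
    (L : List (List Char)) : ∀ (acc : List (List Char)),
    L.foldl (fun out line => out ++ f1 line ++ [f2 line]) acc
      = acc ++ L.flatMap (fun l => f1 l ++ [f2 l]) := by
  induction L with
  | nil => intro acc; simp
  | cons l L ih => intro acc; rw [List.foldl_cons, ih]; simp

-- ===== VERDICT (by name: the statement is the Claim_ definition above) =====
theorem headerParser_spec : Claim_equal_headerParser := by
  unfold Claim_equal_headerParser Spec_headerParser
  intro str _
  unfold headerParser headerParser_alt
  have hrep : (PySem.Str.replace str " " "").toList = str.toList.filter (fun c => c != ' ') := by
    rw [PySem.Str.toList_replace]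
    simpa using replace_space str.toList
  rw [foldA_eq_hpG str.toList [] [], List.nil_append, hpG_filter,
    hpG_eq_rendAll _ [] (by simp) (by simp)
      (by intro c hcm; simpa using (List.mem_filter.mp hcm).2)]
  simp only [hrep, splitOn_eq_splitCh, join_nil_eq_flatten, foldB_flatMap, List.nil_append]
  simp only [rendAll, rendFull]
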